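-- pv_equiv track=rewrite | github.com/vigge93/AoC | 2025/day9.py | part_2
-- ===== SOURCE A (Python) =====
-- from itertools import pairwise
--
-- Data = list[tuple[int, int]]
--
-- def part_2(data: Data):
--     border: set[tuple[int, int]] = set(data)
--     data.append(data[0])
--     for (x1, y1), (x2, y2) in pairwise(data):
--         for x in range(min(x1, x2), max(x1, x2)):
--             border.add((x, y1))
--         for y in range(min(y1, y2), max(y1, y2)):
--             border.add((x1, y))
--
--     squares: list[tuple[int, tuple[tuple[int, int], tuple[int, int]]]] = []
--     for i, (x1, y1) in enumerate(data):
--         for x2, y2 in data[i + 1 :]: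
--             a = (abs(x2 - x1) + 1) * (abs(y2 - y1) + 1)
--             squares.append((a, ((x1, y1), (x2, y2))))
--
--     squares.sort(reverse=True)
--     for a, ls in squares:
--         lsx1 = min(ls[0][0], ls[1][0])
--         lsx2 = max(ls[0][0], ls[1][0])
--         lsy1 = min(ls[0][1], ls[1][1])
--         lsy2 = max(ls[0][1], ls[1][1])
--         found = True
--         for bx, by in border:
--             if lsx1 < bx < lsx2:
--                 if lsy1 < by < lsy2:
--                     found = False
--                     break
--         if found:
--             return a
--     return 0
-- ===== SOURCE B (Python) =====
-- def part_2(data):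
--     # Geometric re-implementation: the border is kept as vertices + segment
--     # descriptions (never materialized point by point), each rectangle's
--     # interior is tested against segments by O(1) interval intersection,
--     # and the maximum empty area is tracked in one pass (no sort).
--     # Unlike A, this does not mutate `data` (A appends data[0] to it).
--     pts = list(data)
--     n = len(pts)
--     segs = [(pts[i], pts[(i + 1) % n]) for i in range(n)]
--
--     def blocked(lx, hx, ly, hy):
--         # Is any border point strictly inside the open box (lx,hx) x (ly,hy)?
--         for vx, vy in pts:
--             if lx < vx < hx and ly < vy < hy:
--                 return True
--         for (x1, y1), (x2, y2) in segs:
--             # horizontal run of border points: (x, y1) for min(x1,x2) <= x < max(x1,x2)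
--             if ly < y1 < hy and max(min(x1, x2), lx + 1) <= min(max(x1, x2) - 1, hx - 1):
--                 return True
--             # vertical run: (x1, y) for min(y1,y2) <= y < max(y1,y2)
--             if lx < x1 < hx and max(min(y1, y2), ly + 1) <= min(max(y1, y2) - 1, hy - 1):
--                 return True
--         return False
--
--     best = 1 if n else 0  # a 1x1 square at a vertex is always border-free
--     for i in range(n):
--         x1, y1 = pts[i]
--         for j in range(i + 1, n):
--             x2, y2 = pts[j]
--             a = (abs(x2 - x1) + 1) * (abs(y2 - y1) + 1)
--             if a > best and not blocked(min(x1, x2), max(x1, x2), min(y1, y2), max(y1, y2)):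
--                 best = a
--     return best
-- ===== Notes on version B (the rewrite author's own statement) =====
-- stated objective: faster
-- what changed: Instead of materializing every integer border point into a set, sorting all O(n^2) candidate rectangles and scanning the whole border set per rectangle, B keeps the border as n vertices plus n segment descriptions, tests each rectangle's open interior against each segment with an O(1) interval-intersection test, and tracks the maximum empty area in a single pass without sorting; B does not mutate data (A appends data[0] to it).
import Mathlib
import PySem

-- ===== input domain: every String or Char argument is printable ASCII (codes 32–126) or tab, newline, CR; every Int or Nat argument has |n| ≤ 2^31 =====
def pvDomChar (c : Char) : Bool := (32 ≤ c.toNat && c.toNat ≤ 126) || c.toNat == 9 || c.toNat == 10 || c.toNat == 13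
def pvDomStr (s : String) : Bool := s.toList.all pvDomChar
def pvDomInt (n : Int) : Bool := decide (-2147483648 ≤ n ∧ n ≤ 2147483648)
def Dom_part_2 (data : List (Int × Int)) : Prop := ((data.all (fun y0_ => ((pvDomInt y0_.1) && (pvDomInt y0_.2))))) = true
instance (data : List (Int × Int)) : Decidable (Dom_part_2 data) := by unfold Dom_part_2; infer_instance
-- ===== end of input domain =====

-- B replaces A's materialized border-point set, O(n^2 log n) sort and per-rectangle border scans with
-- per-segment O(1) interval-intersection tests and a running maximum. A mutates `data` in place (appends data[0])
-- while B does not: the equivalence proved here is about the return value only.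


-- ===== PORT A =====

-- border construction: 'border = set(data)' then for each consecutive pair add the two point runs
def part2Border (ext data : List (Int × Int)) : PySem.Set (Int × Int) :=
  (ext.zip ext.tail).foldl
    (fun b pq =>
      let b1 := (PySem.List.pyRange (min pq.1.1 pq.2.1) (max pq.1.1 pq.2.1) 1).foldl
        (fun b x => PySem.Set.add b (x, pq.1.2)) b
      (PySem.List.pyRange (min pq.1.2 pq.2.2) (max pq.1.2 pq.2.2) 1).foldl
        (fun b y => PySem.Set.add b (pq.1.1, y)) b1)
    (PySem.Set.ofList data)

-- 'squares.append((a, ((x1,y1),(x2,y2))))' over enumerate(data) × data[i+1:]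
def part2Squares (ext : List (Int × Int)) : List (Int × ((Int × Int) × (Int × Int))) :=
  (PySem.List.enumerate ext).foldl
    (fun acc ip =>
      acc ++ (PySem.List.slice ext (some (ip.1 + 1)) none).map
        (fun q => ((|q.1 - ip.2.1| + 1) * (|q.2 - ip.2.2| + 1), (ip.2, q))))
    []

-- the inner 'for bx, by in border: … found = False; break' loop
def part2Found (border : List (Int × Int)) (ls : (Int × Int) × (Int × Int)) : Bool :=
  !(border.any (fun b =>
      decide (min ls.1.1 ls.2.1 < b.1 ∧ b.1 < max ls.1.1 ls.2.1) &&
      decide (min ls.1.2 ls.2.2 < b.2 ∧ b.2 < max ls.1.2 ls.2.2)))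

-- the outer 'for a, ls in squares: … if found: return a' loop; falls through to 'return 0'
def part2Scan (border : List (Int × Int)) : List (Int × ((Int × Int) × (Int × Int))) → Int
  | [] => 0
  | (a, ls) :: rest => if part2Found border ls then a else part2Scan border rest

def part_2 (data : List (Int × Int)) : Int :=
  match data with
  | [] => 0   -- Python raises IndexError on data[0] here; excluded by Pre_part_2
  | p0 :: _ =>
    let ext := data ++ [p0]   -- data.append(data[0])
    let border := part2Border ext data
    let squares := part2Squares ext
    -- Python sorts the (area, rect) tuples lexicographically, descending; the rect components
    -- only order ties WITHIN one area, and the loop returns the area, so the port keys on the area.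
    part2Scan border (PySem.List.sorted squares (fun s => s.1) true)

-- ===== PORT B =====

-- segs = [(pts[i], pts[(i+1) % n]) for i in range(n)]
def altSegs (pts : List (Int × Int)) : List ((Int × Int) × (Int × Int)) :=
  (List.range pts.length).map (fun i => (pts.getD i (0, 0), pts.getD ((i + 1) % pts.length) (0, 0)))

-- blocked(lx, hx, ly, hy): vertex inside the open box, or a segment's point run meets it
def altBlocked (pts : List (Int × Int)) (segs : List ((Int × Int) × (Int × Int)))
    (lx hx ly hy : Int) : Bool :=
  pts.any (fun v => decide (lx < v.1 ∧ v.1 < hx ∧ ly < v.2 ∧ v.2 < hy)) ||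
  segs.any (fun s =>
    decide (ly < s.1.2 ∧ s.1.2 < hy ∧
      max (min s.1.1 s.2.1) (lx + 1) ≤ min (max s.1.1 s.2.1 - 1) (hx - 1)) ||
    decide (lx < s.1.1 ∧ s.1.1 < hx ∧
      max (min s.1.2 s.2.2) (ly + 1) ≤ min (max s.1.2 s.2.2 - 1) (hy - 1)))

-- the inner 'for j in range(i+1, n)' loop, threading best
def altInner (pts : List (Int × Int)) (segs : List ((Int × Int) × (Int × Int)))
    (p : Int × Int) (rest : List (Int × Int)) (best : Int) : Int :=
  rest.foldl
    (fun b q =>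
      if (|q.1 - p.1| + 1) * (|q.2 - p.2| + 1) > b &&
         !altBlocked pts segs (min p.1 q.1) (max p.1 q.1) (min p.2 q.2) (max p.2 q.2)
      then (|q.1 - p.1| + 1) * (|q.2 - p.2| + 1) else b)
    best

-- the outer 'for i in range(n)' loop as recursion over suffixes
def altBest (pts : List (Int × Int)) (segs : List ((Int × Int) × (Int × Int))) :
    List (Int × Int) → Int → Int
  | [], best => best
  | p :: rest, best => altBest pts segs rest (altInner pts segs p rest best)

def part_2_alt (data : List (Int × Int)) : Int :=
  altBest data (altSegs data) data (if data.isEmpty then 0 else 1)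

-- ===== PRECONDITION & SPEC =====
-- Pre_ excludes only the empty list, on which A raises IndexError at data[0].
def Pre_part_2 (data : List (Int × Int)) : Prop := data ≠ []
instance (data : List (Int × Int)) : Decidable (Pre_part_2 data) := by unfold Pre_part_2; infer_instance
def pvWitness_part_2 : (List (Int × Int)) := [(0, 0), (3, 0), (3, 2), (0, 2)]

def Spec_part_2 (data : List (Int × Int)) (out : Int) : Prop := out = part_2_alt data
instance (data : List (Int × Int)) (out : Int) : Decidable (Spec_part_2 data out) := by unfold Spec_part_2; infer_instance

-- ===== CLAIM (what is proved, stated in full; the proofs are below) =====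
def Claim_equal_part_2 : Prop := ∀ (data : List (Int × Int)), Dom_part_2 data → Pre_part_2 data → Spec_part_2 data (part_2 data)

-- ===== LEMMAS AND PROOFS =====

-- proof-side vocabulary
def pairsOf {α : Type} : List α → List (α × α)
  | [] => []
  | x :: xs => xs.map (fun y => (x, y)) ++ pairsOf xs

def rectArea (p q : Int × Int) : Int := (|q.1 - p.1| + 1) * (|q.2 - p.2| + 1)

def onSeg (s : (Int × Int) × (Int × Int)) (pt : Int × Int) : Prop :=
  (∃ x, min s.1.1 s.2.1 ≤ x ∧ x < max s.1.1 s.2.1 ∧ pt = (x, s.1.2)) ∨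
  (∃ y, min s.1.2 s.2.2 ≤ y ∧ y < max s.1.2 s.2.2 ∧ pt = (s.1.1, y))

def inside (lx hx ly hy : Int) (b : Int × Int) : Prop :=
  lx < b.1 ∧ b.1 < hx ∧ ly < b.2 ∧ b.2 < hy

def goodB (pts : List (Int × Int)) (segs : List ((Int × Int) × (Int × Int)))
    (p q : Int × Int) : Prop :=
  altBlocked pts segs (min p.1 q.1) (max p.1 q.1) (min p.2 q.2) (max p.2 q.2) = false

-- 1) membership in A's border set
theorem mem_border (ext data : List (Int × Int)) (pt : Int × Int) :
    pt ∈ part2Border ext data ↔ pt ∈ data ∨ ∃ s ∈ ext.zip ext.tail, onSeg s pt := by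
  have gen : ∀ (l : List ((Int × Int) × (Int × Int))) (b : PySem.Set (Int × Int)),
      pt ∈ l.foldl (fun b pq =>
        let b1 := (PySem.List.pyRange (min pq.1.1 pq.2.1) (max pq.1.1 pq.2.1) 1).foldl
          (fun b x => PySem.Set.add b (x, pq.1.2)) b
        (PySem.List.pyRange (min pq.1.2 pq.2.2) (max pq.1.2 pq.2.2) 1).foldl
          (fun b y => PySem.Set.add b (pq.1.1, y)) b1) b ↔
      pt ∈ b ∨ ∃ s ∈ l, onSeg s pt := by
    intro l
    induction l with
    | nil => simp
    | cons s l ih =>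
      intro b
      rw [List.foldl_cons, ih]
      simp only [PySem.Set.mem_foldl_add, PySem.List.mem_pyRange_one, List.mem_cons, onSeg,
        and_assoc]
      constructor
      · rintro (((h | ⟨x, hx1, hx2, rfl⟩) | ⟨y, hy1, hy2, rfl⟩) | ⟨s', hs', hseg⟩)
        · exact Or.inl h
        · exact Or.inr ⟨s, Or.inl rfl, Or.inl ⟨x, hx1, hx2, rfl⟩⟩
        · exact Or.inr ⟨s, Or.inl rfl, Or.inr ⟨y, hy1, hy2, rfl⟩⟩
        · exact Or.inr ⟨s', Or.inr hs', hseg⟩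
      · rintro (h | ⟨s', rfl | hs', hseg⟩)
        · exact Or.inl (Or.inl (Or.inl h))
        · rcases hseg with ⟨x, hx1, hx2, rfl⟩ | ⟨y, hy1, hy2, rfl⟩
          · exact Or.inl (Or.inl (Or.inr ⟨x, hx1, hx2, rfl⟩))
          · exact Or.inl (Or.inr ⟨y, hy1, hy2, rfl⟩)
        · exact Or.inr ⟨s', hs', hseg⟩
  rw [part2Border, gen, PySem.Set.mem_ofList]

-- 2) a segment's point run meets the open box iff the interval test passes
theorem seg_hit (s : (Int × Int) × (Int × Int)) (lx hx ly hy : Int) :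
    (∃ pt, onSeg s pt ∧ inside lx hx ly hy pt) ↔
      ((ly < s.1.2 ∧ s.1.2 < hy ∧
          max (min s.1.1 s.2.1) (lx + 1) ≤ min (max s.1.1 s.2.1 - 1) (hx - 1)) ∨
       (lx < s.1.1 ∧ s.1.1 < hx ∧
          max (min s.1.2 s.2.2) (ly + 1) ≤ min (max s.1.2 s.2.2 - 1) (hy - 1))) := by
  constructor
  · rintro ⟨pt, hseg, hin⟩
    rcases hseg with ⟨x, h1, h2, rfl⟩ | ⟨y, h1, h2, rfl⟩
    · left; simp [inside] at hin; omega
    · right; simp [inside] at hin; omega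
  · rintro (⟨h1, h2, h3⟩ | ⟨h1, h2, h3⟩)
    · exact ⟨(max (min s.1.1 s.2.1) (lx + 1), s.1.2),
        Or.inl ⟨max (min s.1.1 s.2.1) (lx + 1), by omega, by omega, rfl⟩,
        by simp [inside]; omega⟩
    · exact ⟨(s.1.1, max (min s.1.2 s.2.2) (ly + 1)),
        Or.inr ⟨max (min s.1.2 s.2.2) (ly + 1), by omega, by omega, rfl⟩,
        by simp [inside]; omega⟩

-- 3) what altBlocked decides
theorem altBlocked_iff (pts : List (Int × Int)) (segs : List ((Int × Int) × (Int × Int)))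
    (lx hx ly hy : Int) :
    altBlocked pts segs lx hx ly hy = true ↔
      (∃ v ∈ pts, inside lx hx ly hy v) ∨ ∃ s ∈ segs, ∃ pt, onSeg s pt ∧ inside lx hx ly hy pt := by
  simp only [altBlocked, Bool.or_eq_true, List.any_eq_true, decide_eq_true_eq]
  apply or_congr
  · exact exists_congr fun v => and_congr_right fun _ => by simp [inside]
  · exact exists_congr fun s => and_congr_right fun _ => (seg_hit s lx hx ly hy).symm

-- 4) B's segment list is A's pairwise(data + [data[0]])
theorem segs_eq (p0 : Int × Int) (rest : List (Int × Int)) :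
    altSegs (p0 :: rest) = (p0 :: rest).zip (rest ++ [p0]) := by
  apply List.ext_getElem
  · simp [altSegs]
  · intro i h1 h2
    simp only [altSegs, List.getElem_map, List.getElem_range, List.getElem_zip]
    have hlen : (p0 :: rest).length = rest.length + 1 := by simp
    have hi : i < rest.length + 1 := by simpa [altSegs] using h1
    refine Prod.ext ?_ ?_
    · simp only []
      rw [List.getD_eq_getElem _ _ (by omega)]
    · simp only []
      rcases Nat.lt_or_ge i rest.length with hlt | hge
      · have hmod : (i + 1) % (p0 :: rest).length = i + 1 := by
          rw [hlen]; exact Nat.mod_eq_of_lt (by omega)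
        rw [hmod, List.getD_eq_getElem _ _ (by simp; omega)]
        rw [List.getElem_cons_succ, List.getElem_append_left hlt]
      · have hieq : i = rest.length := by omega
        subst hieq
        have hmod : (rest.length + 1) % (p0 :: rest).length = 0 := by
          rw [hlen]; exact Nat.mod_self _
        rw [hmod, List.getD_eq_getElem _ _ (by simp)]
        simp [List.getElem_append_right (le_refl rest.length)]

theorem ext_zip_eq (p0 : Int × Int) (rest : List (Int × Int)) :
    (((p0 :: rest) ++ [p0]).zip ((p0 :: rest) ++ [p0]).tail) = (p0 :: rest).zip (rest ++ [p0]) := by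
  have htail : ((p0 :: rest) ++ [p0]).tail = rest ++ [p0] := by simp
  rw [htail]
  apply List.ext_getElem
  · simp [List.length_zip]
  · intro i h1 h2
    simp only [List.getElem_zip]
    refine Prod.ext ?_ rfl
    simp only []
    have hi : i < (p0 :: rest).length := by
      simp only [List.length_zip] at h2; simp at h2 ⊢; omega
    rw [List.getElem_append_left hi]

-- 5) bridge: A's found test is the negation of B's blocked test
theorem found_eq (p0 : Int × Int) (rest : List (Int × Int)) (ls : (Int × Int) × (Int × Int)) :
    part2Found (part2Border ((p0 :: rest) ++ [p0]) (p0 :: rest)) ls =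
      !altBlocked (p0 :: rest) (altSegs (p0 :: rest))
        (min ls.1.1 ls.2.1) (max ls.1.1 ls.2.1) (min ls.1.2 ls.2.2) (max ls.1.2 ls.2.2) := by
  have key : (part2Border ((p0 :: rest) ++ [p0]) (p0 :: rest)).any (fun b =>
      decide (min ls.1.1 ls.2.1 < b.1 ∧ b.1 < max ls.1.1 ls.2.1) &&
      decide (min ls.1.2 ls.2.2 < b.2 ∧ b.2 < max ls.1.2 ls.2.2)) =
      altBlocked (p0 :: rest) (altSegs (p0 :: rest))
        (min ls.1.1 ls.2.1) (max ls.1.1 ls.2.1) (min ls.1.2 ls.2.2) (max ls.1.2 ls.2.2) := by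
    rw [Bool.eq_iff_iff, altBlocked_iff, List.any_eq_true]
    constructor
    · rintro ⟨b, hb, hcond⟩
      rw [Bool.and_eq_true, decide_eq_true_eq, decide_eq_true_eq] at hcond
      have hin : inside (min ls.1.1 ls.2.1) (max ls.1.1 ls.2.1) (min ls.1.2 ls.2.2)
          (max ls.1.2 ls.2.2) b := ⟨hcond.1.1, hcond.1.2, hcond.2.1, hcond.2.2⟩
      rcases (mem_border _ _ b).mp hb with hv | ⟨s, hs, hseg⟩
      · exact Or.inl ⟨b, hv, hin⟩
      · rw [ext_zip_eq, ← segs_eq] at hs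
        exact Or.inr ⟨s, hs, b, hseg, hin⟩
    · rintro (⟨v, hv, hin⟩ | ⟨s, hs, bpt, hseg, hin⟩)
      · refine ⟨v, (mem_border _ _ v).mpr (Or.inl hv), ?_⟩
        rw [Bool.and_eq_true, decide_eq_true_eq, decide_eq_true_eq]
        exact ⟨⟨hin.1, hin.2.1⟩, hin.2.2.1, hin.2.2.2⟩
      · rw [segs_eq, ← ext_zip_eq] at hs
        refine ⟨bpt, (mem_border _ _ bpt).mpr (Or.inr ⟨s, hs, hseg⟩), ?_⟩
        rw [Bool.and_eq_true, decide_eq_true_eq, decide_eq_true_eq]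
        exact ⟨⟨hin.1, hin.2.1⟩, hin.2.2.1, hin.2.2.2⟩
  rw [part2Found, key]

-- 6) A's squares list
theorem squares_eq (ext : List (Int × Int)) :
    part2Squares ext = (pairsOf ext).map (fun pq => (rectArea pq.1 pq.2, pq)) := by
  have gen : ∀ (suf pre : List (Int × Int)),
      (PySem.List.enumerate suf (pre.length : Int)).flatMap
        (fun ip => (PySem.List.slice (pre ++ suf) (some (ip.1 + 1)) none).map
          (fun q => ((|q.1 - ip.2.1| + 1) * (|q.2 - ip.2.2| + 1), (ip.2, q))))
      = (pairsOf suf).map (fun pq => (rectArea pq.1 pq.2, pq)) := by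
    intro suf
    induction suf with
    | nil => intro pre; simp [pairsOf]
    | cons x xs ih =>
      intro pre
      rw [PySem.List.enumerate_cons, List.flatMap_cons]
      have h1 : PySem.List.slice (pre ++ x :: xs) (some ((pre.length : Int) + 1)) none = xs := by
        have hc : ((pre.length : Int) + 1) = ((pre.length + 1 : Nat) : Int) := by push_cast; ring
        rw [hc, PySem.List.slice_from_natCast,
          show pre ++ x :: xs = (pre ++ [x]) ++ xs by simp,
          show pre.length + 1 = (pre ++ [x]).length by simp]
        exact List.drop_left
      have h2 : (pre.length : Int) + 1 = (((pre ++ [x]).length : Nat) : Int) := by simp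
      rw [h1, h2, show pre ++ x :: xs = (pre ++ [x]) ++ xs by simp, ih (pre ++ [x])]
      simp [pairsOf, Function.comp_def, rectArea]
  rw [part2Squares, PySem.List.foldl_append_eq_flatMap, List.nil_append]
  simpa using gen ext []

-- 7) pairsOf facts
theorem mem_pairsOf_append_singleton {α : Type} (l : List α) (z : α) (pq : α × α) :
    pq ∈ pairsOf (l ++ [z]) ↔ pq ∈ pairsOf l ∨ (pq.1 ∈ l ∧ pq.2 = z) := by
  obtain ⟨a, b⟩ := pq
  induction l with
  | nil => simp [pairsOf]
  | cons x xs ih =>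
    simp only [List.cons_append, pairsOf, List.mem_append, List.mem_map, List.mem_cons,
      List.not_mem_nil, or_false, Prod.mk.injEq] at ih ⊢
    rw [ih]
    constructor
    · rintro (⟨y, hy | rfl, rfl, rfl⟩ | h | h)
      · exact Or.inl (Or.inl ⟨y, hy, rfl, rfl⟩)
      · exact Or.inr ⟨Or.inl rfl, rfl⟩
      · exact Or.inl (Or.inr h)
      · exact Or.inr ⟨Or.inr h.1, h.2⟩
    · rintro ((⟨y, hy, rfl, rfl⟩ | h) | ⟨rfl | h1, rfl⟩)
      · exact Or.inl ⟨y, Or.inl hy, rfl, rfl⟩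
      · exact Or.inr (Or.inl h)
      · exact Or.inl ⟨b, Or.inr rfl, rfl, rfl⟩
      · exact Or.inr (Or.inr ⟨h1, rfl⟩)

theorem head_mem_pairsOf {α : Type} (x q : α) (xs : List α) (hq : q ∈ xs) :
    (x, q) ∈ pairsOf (x :: xs) := by
  simp only [pairsOf, List.mem_append, List.mem_map]
  exact Or.inl ⟨q, hq, rfl⟩

-- symmetry of the candidate data
theorem rectArea_comm (p q : Int × Int) : rectArea p q = rectArea q p := by
  simp [rectArea, abs_sub_comm]

theorem goodB_comm (pts segs) (p q : Int × Int) : goodB pts segs p q ↔ goodB pts segs q p := by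
  simp [goodB, min_comm p.1 q.1, max_comm p.1 q.1, min_comm p.2 q.2, max_comm p.2 q.2]

-- the degenerate rectangle is never blocked
theorem degenerate_good (pts segs) (p : Int × Int) : goodB pts segs p p := by
  rw [goodB, ← Bool.not_eq_true, altBlocked_iff]
  rintro (⟨v, _, h⟩ | ⟨s, _, pt, _, h⟩) <;> simp [inside] at h <;> omega

theorem rectArea_self (p : Int × Int) : rectArea p p = 1 := by
  simp [rectArea]

-- 8) A's scan over a descending list returns the best admissible area
theorem scan_spec (border : List (Int × Int)) :
    ∀ l : List (Int × ((Int × Int) × (Int × Int))),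
      l.Pairwise (fun s t => t.1 ≤ s.1) →
      (∃ e ∈ l, part2Found border e.2 = true) →
      ∃ e ∈ l, part2Found border e.2 = true ∧ part2Scan border l = e.1 ∧
        ∀ e' ∈ l, part2Found border e'.2 = true → e'.1 ≤ e.1 := by
  intro l hpw hex
  induction l with
  | nil => simp at hex
  | cons e0 rest ih =>
    obtain ⟨a, ls⟩ := e0
    rw [List.pairwise_cons] at hpw
    by_cases hf : part2Found border ls = true
    · refine ⟨(a, ls), List.mem_cons_self, hf, by simp [part2Scan, hf], ?_⟩
      intro e' he' _
      rcases List.mem_cons.mp he' with rfl | he''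
      · exact le_refl _
      · exact hpw.1 e' he''
    · have hex' : ∃ e ∈ rest, part2Found border e.2 = true := by
        rcases hex with ⟨e, he, hfe⟩
        rcases List.mem_cons.mp he with rfl | he'
        · exact absurd hfe hf
        · exact ⟨e, he', hfe⟩
      obtain ⟨e, he, hfe, heq, hmax⟩ := ih hpw.2 hex'
      refine ⟨e, List.mem_cons_of_mem _ he, hfe, ?_, ?_⟩
      · simp [part2Scan, hf, heq]
      · intro e' he' hfe'
        rcases List.mem_cons.mp he' with rfl | he''
        · exact absurd hfe' hf
        · exact hmax e' he'' hfe'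

-- 9) inner loop of B
theorem altInner_spec (pts segs) (p : Int × Int) :
    ∀ (rest : List (Int × Int)) (best : Int),
      best ≤ altInner pts segs p rest best ∧
      (altInner pts segs p rest best = best ∨
        ∃ q ∈ rest, goodB pts segs p q ∧ altInner pts segs p rest best = rectArea p q) ∧
      (∀ q ∈ rest, goodB pts segs p q → rectArea p q ≤ altInner pts segs p rest best) := by
  intro rest
  induction rest with
  | nil => intro best; refine ⟨le_refl _, Or.inl rfl, by simp⟩
  | cons q rest ih =>
    intro best
    have hstep : altInner pts segs p (q :: rest) best =
        altInner pts segs p rest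
          (if (|q.1 - p.1| + 1) * (|q.2 - p.2| + 1) > best &&
              !altBlocked pts segs (min p.1 q.1) (max p.1 q.1) (min p.2 q.2) (max p.2 q.2)
           then (|q.1 - p.1| + 1) * (|q.2 - p.2| + 1) else best) := rfl
    by_cases hc : ((|q.1 - p.1| + 1) * (|q.2 - p.2| + 1) > best &&
        !altBlocked pts segs (min p.1 q.1) (max p.1 q.1) (min p.2 q.2) (max p.2 q.2)) = true
    · rw [Bool.and_eq_true, decide_eq_true_eq, Bool.not_eq_true'] at hc
      obtain ⟨ihle, ihcases, ihmax⟩ := ih ((|q.1 - p.1| + 1) * (|q.2 - p.2| + 1))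
      rw [hstep, if_pos (by rw [Bool.and_eq_true, decide_eq_true_eq, Bool.not_eq_true']; exact hc)]
      refine ⟨le_trans (le_of_lt hc.1) ihle, ?_, ?_⟩
      · rcases ihcases with h | ⟨q', hq', hg, h⟩
        · exact Or.inr ⟨q, List.mem_cons_self, hc.2, h⟩
        · exact Or.inr ⟨q', List.mem_cons_of_mem _ hq', hg, h⟩
      · intro q' hq' hg
        rcases List.mem_cons.mp hq' with rfl | hq''
        · exact ihle
        · exact ihmax q' hq'' hg
    · obtain ⟨ihle, ihcases, ihmax⟩ := ih best
      rw [hstep, if_neg (fun h => hc h)]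
      refine ⟨ihle, ?_, ?_⟩
      · rcases ihcases with h | ⟨q', hq', hg, h⟩
        · exact Or.inl h
        · exact Or.inr ⟨q', List.mem_cons_of_mem _ hq', hg, h⟩
      · intro q' hq' hg
        rcases List.mem_cons.mp hq' with rfl | hq''
        · rw [Bool.and_eq_true, decide_eq_true_eq, Bool.not_eq_true'] at hc
          have hle : (|q'.1 - p.1| + 1) * (|q'.2 - p.2| + 1) ≤ best := by
            by_contra hgt
            exact hc ⟨lt_of_not_ge hgt, hg⟩
          exact le_trans hle ihle
        · exact ihmax q' hq'' hg

-- 10) outer loop of B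
theorem altBest_spec (pts segs) :
    ∀ (l : List (Int × Int)) (best : Int),
      best ≤ altBest pts segs l best ∧
      (altBest pts segs l best = best ∨
        ∃ pq ∈ pairsOf l, goodB pts segs pq.1 pq.2 ∧ altBest pts segs l best = rectArea pq.1 pq.2) ∧
      (∀ pq ∈ pairsOf l, goodB pts segs pq.1 pq.2 → rectArea pq.1 pq.2 ≤ altBest pts segs l best) := by
  intro l
  induction l with
  | nil => intro best; exact ⟨le_refl _, Or.inl rfl, by simp [pairsOf]⟩
  | cons p rest ih =>
    intro best
    have hstep : altBest pts segs (p :: rest) best =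
        altBest pts segs rest (altInner pts segs p rest best) := rfl
    obtain ⟨ile, icases, imax⟩ := altInner_spec pts segs p rest best
    obtain ⟨ble, bcases, bmax⟩ := ih (altInner pts segs p rest best)
    rw [hstep]
    refine ⟨le_trans ile ble, ?_, ?_⟩
    · rcases bcases with h | ⟨pq, hpq, hg, h⟩
      · rw [h]
        rcases icases with h' | ⟨q, hq, hg, h'⟩
        · exact Or.inl h'
        · exact Or.inr ⟨(p, q), by
            simp only [pairsOf, List.mem_append, List.mem_map]
            exact Or.inl ⟨q, hq, rfl⟩, hg, h'⟩
      · exact Or.inr ⟨pq, by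
          simp only [pairsOf, List.mem_append]
          exact Or.inr hpq, hg, h⟩
    · intro pq hpq hg
      simp only [pairsOf, List.mem_append, List.mem_map] at hpq
      rcases hpq with ⟨q, hq, rfl⟩ | hpq
      · exact le_trans (imax q hq hg) ble
      · exact bmax pq hpq hg

-- ===== VERDICT (by name: the statement is the Claim_ definition above) =====
set_option maxHeartbeats 1600000 in
theorem part_2_spec : Claim_equal_part_2 := by
  intro data _ hpre
  unfold Spec_part_2
  obtain ⟨p0, rest, rfl⟩ : ∃ p0 rest, data = p0 :: rest := by
    cases data with
    | nil => exact absurd rfl hpre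
    | cons a l => exact ⟨a, l, rfl⟩
  simp only [part_2, part_2_alt, List.isEmpty_cons, Bool.false_eq_true, if_false]
  have hgb : ∀ e : Int × ((Int × Int) × (Int × Int)),
      part2Found (part2Border ((p0 :: rest) ++ [p0]) (p0 :: rest)) e.2 = true ↔
        goodB (p0 :: rest) (altSegs (p0 :: rest)) e.2.1 e.2.2 := by
    intro e
    rw [found_eq p0 rest e.2, Bool.not_eq_true']
    exact Iff.rfl
  have hpw : (PySem.List.sorted (part2Squares ((p0 :: rest) ++ [p0])) (fun s => s.1)
      true).Pairwise (fun s t => t.1 ≤ s.1) := PySem.List.sorted_pairwise_rev _ _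
  have hdeg_mem : ((1 : Int), (p0, p0)) ∈
      PySem.List.sorted (part2Squares ((p0 :: rest) ++ [p0])) (fun s => s.1) true := by
    rw [PySem.List.mem_sorted, squares_eq]
    refine List.mem_map.mpr ⟨(p0, p0), ?_, by simp [rectArea]⟩
    rw [mem_pairsOf_append_singleton]
    exact Or.inr ⟨List.mem_cons_self, rfl⟩
  have hex : ∃ e ∈ PySem.List.sorted (part2Squares ((p0 :: rest) ++ [p0])) (fun s => s.1) true,
      part2Found (part2Border ((p0 :: rest) ++ [p0]) (p0 :: rest)) e.2 = true :=
    ⟨(1, (p0, p0)), hdeg_mem, (hgb _).mpr (degenerate_good _ _ _)⟩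
  obtain ⟨e, heMem, heF, heEq, heMax⟩ :=
    scan_spec (part2Border ((p0 :: rest) ++ [p0]) (p0 :: rest)) _ hpw hex
  obtain ⟨hBle, hBcases, hBmax⟩ := altBest_spec (p0 :: rest) (altSegs (p0 :: rest)) (p0 :: rest) 1
  rw [heEq]
  apply le_antisymm
  · have heSq : e ∈ part2Squares ((p0 :: rest) ++ [p0]) :=
      (PySem.List.mem_sorted _ _ _ _).mp heMem
    rw [squares_eq] at heSq
    obtain ⟨pq, hpq, rfl⟩ := List.mem_map.mp heSq
    have hgood : goodB (p0 :: rest) (altSegs (p0 :: rest)) pq.1 pq.2 := (hgb _).mp heF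
    rw [mem_pairsOf_append_singleton] at hpq
    rcases hpq with hin | ⟨h1, h2⟩
    · exact hBmax pq hin hgood
    · obtain ⟨p, q⟩ := pq
      simp only at h1 h2
      rcases List.mem_cons.mp h1 with h1' | hpr
      · have hone : rectArea p q = 1 := by rw [h1', h2, rectArea_self]
        simpa [hone] using hBle
      · have hgood' : goodB (p0 :: rest) (altSegs (p0 :: rest)) p0 p := by
          rw [h2] at hgood
          exact (goodB_comm _ _ _ _).mp hgood
        have h3 := hBmax (p0, p) (head_mem_pairsOf p0 p rest hpr) hgood'
        have h4 : rectArea p q = rectArea p0 p := by rw [h2, rectArea_comm]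
        simpa [h4] using h3
  · rcases hBcases with h | ⟨pq, hpq, hgood, h⟩
    · rw [h]
      simpa using heMax (1, (p0, p0)) hdeg_mem ((hgb _).mpr (degenerate_good _ _ _))
    · rw [h]
      have hmemss : (rectArea pq.1 pq.2, pq) ∈
          PySem.List.sorted (part2Squares ((p0 :: rest) ++ [p0])) (fun s => s.1) true := by
        rw [PySem.List.mem_sorted, squares_eq]
        refine List.mem_map.mpr ⟨pq, ?_, rfl⟩
        rw [mem_pairsOf_append_singleton]
        exact Or.inl hpq
      simpa using heMax _ hmemss ((hgb _).mpr hgood)
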